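-- pv_equiv track=rewrite | github.com/ChimdumebiNebolisa/datuum2.0 | public/python/chart_recommender.py | _get_pie_config
-- ===== SOURCE A (Python) =====
-- from typing import Dict, List, Any, Optional, Tuple
--
-- def _get_pie_config(data_analysis: Dict[str, Any], columns: List[str]) -> Dict[str, Any]:
--     """Get configuration for pie chart"""
--     config = {
--         'label_column': None,
--         'value_column': None
--     }
--
--     # Find categorical column for labels
--     for col in columns:
--         if col in data_analysis['categorical_columns']:
--             config['label_column'] = col
--             break
--
--     # Find numeric column for values
--     for col in columns:
--         if col in data_analysis['numeric_columns']:
--             config['value_column'] = col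
--             break
--
--     return config
-- ===== SOURCE B (Python) =====
-- def _get_pie_config(data_analysis, columns):
--     """Get configuration for pie chart (single fused pass with early exit)"""
--     label = value = None
--     for col in columns:
--         if label is None and col in data_analysis['categorical_columns']:
--             label = col
--         if value is None and col in data_analysis['numeric_columns']:
--             value = col
--         if label is not None and value is not None:
--             break
--     return {'label_column': label, 'value_column': value}
-- ===== Notes on version B (the rewrite author's own statement) =====
-- stated objective: alternative
-- what changed: A's two sequential scans of columns (one finding the first categorical column, one finding the first numeric column) are fused into a single pass that maintains both slots and breaks as soon as both are filled.
import Mathlib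
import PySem

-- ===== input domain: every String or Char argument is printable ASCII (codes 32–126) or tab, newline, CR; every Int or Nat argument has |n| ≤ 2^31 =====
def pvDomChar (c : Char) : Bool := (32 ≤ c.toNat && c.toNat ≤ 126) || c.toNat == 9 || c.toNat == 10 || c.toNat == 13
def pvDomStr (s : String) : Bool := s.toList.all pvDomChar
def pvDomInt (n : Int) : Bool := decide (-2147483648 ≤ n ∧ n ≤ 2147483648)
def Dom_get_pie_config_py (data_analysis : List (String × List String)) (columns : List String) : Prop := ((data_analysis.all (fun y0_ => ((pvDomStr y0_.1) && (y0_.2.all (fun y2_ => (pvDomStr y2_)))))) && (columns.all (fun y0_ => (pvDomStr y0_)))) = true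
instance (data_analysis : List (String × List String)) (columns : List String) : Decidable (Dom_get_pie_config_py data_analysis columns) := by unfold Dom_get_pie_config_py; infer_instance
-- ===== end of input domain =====

-- B fuses A's two sequential scans of `columns` into one pass with early exit; return-value equivalence.

-- dict access d[k] as first-match association-list lookup (exact under the dict convention; on Pre_ the
-- key exists wherever either Python subscripts, so the [] total-default is never observed)
def pvGetD (d : List (String × List String)) (k : String) : List String :=
  match d with
  | [] => []
  | (k', v) :: rest => if k' == k then v else pvGetD rest k

-- ===== PORT A =====
-- A's 'for col in columns: if col in allowed: … ; break' loop
def pvFindFirst (allowed : List String) : List String → Option String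
  | [] => none
  | c :: rest => if c ∈ allowed then some c else pvFindFirst allowed rest

def get_pie_config_py (data_analysis : List (String × List String)) (columns : List String) : List (String × Option String) :=
  [("label_column", pvFindFirst (pvGetD data_analysis "categorical_columns") columns),
   ("value_column", pvFindFirst (pvGetD data_analysis "numeric_columns") columns)]

-- ===== PORT B =====
-- B's single fused loop over columns, maintaining both slots, breaking once both are filled
def pvFused (data_analysis : List (String × List String)) (l v : Option String) : List String → Option String × Option String
  | [] => (l, v)
  | c :: rest =>
    let l' := if l = none ∧ c ∈ pvGetD data_analysis "categorical_columns" then some c else l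
    let v' := if v = none ∧ c ∈ pvGetD data_analysis "numeric_columns" then some c else v
    if l' ≠ none ∧ v' ≠ none then (l', v') else pvFused data_analysis l' v' rest

def get_pie_config_py_alt (data_analysis : List (String × List String)) (columns : List String) : List (String × Option String) :=
  let r := pvFused data_analysis none none columns
  [("label_column", r.1), ("value_column", r.2)]

-- ===== PRECONDITION & SPEC =====
-- Pre_ excludes exactly the inputs on which A raises KeyError: columns non-empty while
-- 'categorical_columns' or 'numeric_columns' is absent from data_analysis.
def Pre_get_pie_config_py (data_analysis : List (String × List String)) (columns : List String) : Prop :=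
  columns = [] ∨ ("categorical_columns" ∈ data_analysis.map Prod.fst ∧ "numeric_columns" ∈ data_analysis.map Prod.fst)
instance (data_analysis : List (String × List String)) (columns : List String) : Decidable (Pre_get_pie_config_py data_analysis columns) := by unfold Pre_get_pie_config_py; infer_instance
def pvWitness_get_pie_config_py : (List (String × List String)) × List String :=
  ([("categorical_columns", ["a"]), ("numeric_columns", ["b"])], ["a", "b"])

def Spec_get_pie_config_py (data_analysis : List (String × List String)) (columns : List String) (out : List (String × Option String)) : Prop := out = get_pie_config_py_alt data_analysis columns
instance (data_analysis : List (String × List String)) (columns : List String) (out : List (String × Option String)) : Decidable (Spec_get_pie_config_py data_analysis columns out) := by unfold Spec_get_pie_config_py; infer_instance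

-- ===== CLAIM (what is proved, stated in full; the proofs are below) =====
def Claim_equal_get_pie_config_py : Prop := ∀ (data_analysis : List (String × List String)) (columns : List String), Dom_get_pie_config_py data_analysis columns → Pre_get_pie_config_py data_analysis columns → Spec_get_pie_config_py data_analysis columns (get_pie_config_py data_analysis columns)

-- ===== LEMMAS AND PROOFS =====

-- The fused loop computes, in each slot, the old value if already set, else the first match —
-- i.e. exactly A's two independent scans.
lemma pvFused_eq (da : List (String × List String)) (l v : Option String) (cols : List String) :
    pvFused da l v cols =
      ((match l with | some a => some a | none => pvFindFirst (pvGetD da "categorical_columns") cols),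
       (match v with | some a => some a | none => pvFindFirst (pvGetD da "numeric_columns") cols)) := by
  induction cols generalizing l v with
  | nil => cases l <;> cases v <;> simp [pvFused, pvFindFirst]
  | cons c rest ih =>
    cases l <;> cases v <;>
      simp only [pvFused, pvFindFirst] <;>
      split_ifs <;> (first | rw [ih] | skip) <;> simp_all

-- ===== VERDICT (by name: the statement is the Claim_ definition above) =====
theorem get_pie_config_py_spec : Claim_equal_get_pie_config_py := by
  intro da cols _ _
  simp [Spec_get_pie_config_py, get_pie_config_py, get_pie_config_py_alt, pvFused_eq]
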